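-- pv_equiv track=rewrite | github.com/eristenn/soc-dashboard | monitor.py | get_primary_activity
-- ===== SOURCE A (Python) =====
-- def get_primary_activity(category_summary):
--     priority_order = ['Gaming', 'School/Work', 'Job Search', 'Browsing', 'Unknown']
--
--     best_category = 'Unknown'
--     best_score = -1
--
--     for category in priority_order:
--         if category_summary.get(category, 0) > best_score:
--             best_score = category_summary.get(category, 0)
--             best_category = category
--
--     return best_category
-- ===== SOURCE B (Python) =====
-- def get_primary_activity(category_summary):
--     priority_order = ['Gaming', 'School/Work', 'Job Search', 'Browsing', 'Unknown']
--     return sorted(priority_order, key=lambda c: -category_summary.get(c, 0))[0]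
-- ===== Notes on version B (the rewrite author's own statement) =====
-- stated objective: idiomatic
-- what changed: Replaces the running-best scan with its -1 sentinel by a stable sort of the priority list on negated score, taking the head; ties keep priority order, reproducing the strict-> tie-break.
-- intended difference: When all five priority categories are present with negative scores and 'Unknown' does not strictly outscore the others, A's -1 sentinel makes the loop never update so A returns 'Unknown' regardless of the scores, while B returns the earliest highest-scoring category, which is the intended pick. — e.g. on get_primary_activity([("Gaming", -2), ("School/Work", -3), ("Job Search", -3), ("Browsing", -3), ("Unknown", -3)]): A returns "Unknown", B returns "Gaming"
import Mathlib
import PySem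

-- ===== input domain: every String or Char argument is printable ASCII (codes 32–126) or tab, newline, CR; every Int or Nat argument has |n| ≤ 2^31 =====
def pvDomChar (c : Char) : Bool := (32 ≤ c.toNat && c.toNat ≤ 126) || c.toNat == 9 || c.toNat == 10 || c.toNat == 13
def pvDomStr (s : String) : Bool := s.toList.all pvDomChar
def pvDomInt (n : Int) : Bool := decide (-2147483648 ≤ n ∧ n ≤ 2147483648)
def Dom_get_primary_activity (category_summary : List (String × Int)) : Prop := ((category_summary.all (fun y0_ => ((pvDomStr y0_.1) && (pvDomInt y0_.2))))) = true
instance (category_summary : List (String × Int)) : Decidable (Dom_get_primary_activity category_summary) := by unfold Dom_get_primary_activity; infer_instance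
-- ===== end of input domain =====

-- B replaces A's running-best scan (with its -1 sentinel) by a stable sort of the priority
-- list on negated score, taking the head; A and B differ only on the D_ corner stated below.

-- ===== PORT A =====
def get_primary_activity (category_summary : List (String × Int)) : String :=
  let priority_order := ["Gaming", "School/Work", "Job Search", "Browsing", "Unknown"]
  -- best_category = 'Unknown'; best_score = -1; for category in priority_order: …
  let st := priority_order.foldl
    (fun (st : String × Int) category =>
      if (PySem.Dict.mk category_summary).getD category 0 > st.2 then
        (category, (PySem.Dict.mk category_summary).getD category 0)
      else st)
    ("Unknown", -1)
  st.1

-- ===== PORT B =====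
def get_primary_activity_alt (category_summary : List (String × Int)) : String :=
  let priority_order := ["Gaming", "School/Work", "Job Search", "Browsing", "Unknown"]
  PySem.List.pyGetD
    (PySem.List.sorted priority_order
      (fun c => -(PySem.Dict.mk category_summary).getD c 0) false)
    0 ""

-- ===== PRECONDITION & SPEC =====
-- When all five priority categories are present with negative scores and 'Unknown' does not
-- strictly outscore the others, A's -1 sentinel makes the loop never update so A returns
-- 'Unknown' regardless of the scores, while B returns the earliest highest-scoring category,
-- which is the intended pick.
def D_get_primary_activity (category_summary : List (String × Int)) : Prop :=
  (PySem.Dict.mk category_summary).getD "Gaming" 0 ≤ -1 ∧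
  (PySem.Dict.mk category_summary).getD "School/Work" 0 ≤ -1 ∧
  (PySem.Dict.mk category_summary).getD "Job Search" 0 ≤ -1 ∧
  (PySem.Dict.mk category_summary).getD "Browsing" 0 ≤ -1 ∧
  (PySem.Dict.mk category_summary).getD "Unknown" 0 ≤ -1 ∧
  ((PySem.Dict.mk category_summary).getD "Unknown" 0 ≤ (PySem.Dict.mk category_summary).getD "Gaming" 0 ∨
   (PySem.Dict.mk category_summary).getD "Unknown" 0 ≤ (PySem.Dict.mk category_summary).getD "School/Work" 0 ∨
   (PySem.Dict.mk category_summary).getD "Unknown" 0 ≤ (PySem.Dict.mk category_summary).getD "Job Search" 0 ∨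
   (PySem.Dict.mk category_summary).getD "Unknown" 0 ≤ (PySem.Dict.mk category_summary).getD "Browsing" 0)
instance (category_summary : List (String × Int)) : Decidable (D_get_primary_activity category_summary) := by
  unfold D_get_primary_activity; infer_instance

def Spec_get_primary_activity (category_summary : List (String × Int)) (out : String) : Prop :=
  ¬ D_get_primary_activity category_summary → out = get_primary_activity_alt category_summary
instance (category_summary : List (String × Int)) (out : String) : Decidable (Spec_get_primary_activity category_summary out) := by
  unfold Spec_get_primary_activity; infer_instance

def pvDiffWitness_get_primary_activity : (List (String × Int)) :=
  [("Gaming", -2), ("School/Work", -3), ("Job Search", -3), ("Browsing", -3), ("Unknown", -3)]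
def pvDiffWitnessOut_get_primary_activity : String × String := ("Unknown", "Gaming")

-- ===== CLAIM (what is proved, stated in full; the proofs are below) =====
def Claim_unchanged_get_primary_activity : Prop := ∀ (category_summary : List (String × Int)), Dom_get_primary_activity category_summary → Spec_get_primary_activity category_summary (get_primary_activity category_summary)
def Claim_changed_get_primary_activity : Prop := Dom_get_primary_activity (pvDiffWitness_get_primary_activity) ∧ D_get_primary_activity (pvDiffWitness_get_primary_activity) ∧ get_primary_activity (pvDiffWitness_get_primary_activity) = pvDiffWitnessOut_get_primary_activity.1 ∧ get_primary_activity_alt (pvDiffWitness_get_primary_activity) = pvDiffWitnessOut_get_primary_activity.2 ∧ pvDiffWitnessOut_get_primary_activity.1 ≠ pvDiffWitnessOut_get_primary_activity.2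
def Claim_exact_get_primary_activity : Prop := ∀ (category_summary : List (String × Int)), Dom_get_primary_activity category_summary → D_get_primary_activity category_summary → get_primary_activity category_summary ≠ get_primary_activity_alt category_summary

-- ===== LEMMAS AND PROOFS =====

-- head of an insertBy insertion, in terms of the old head
lemma head_insertBy {α : Type} (before : α → α → Bool) (x : α) (acc : List α) :
    (PySem.List.insertBy before x acc).head? =
      some (match acc.head? with | none => x | some y => if before x y then x else y) := by
  cases acc with
  | nil => simp [PySem.List.insertBy]
  | cons y t =>
      simp only [PySem.List.insertBy, List.head?_cons]
      split <;> simp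

-- head of the insertion-sort fold = a running-minimum fold
lemma head_foldl_insertBy {α : Type} (before : α → α → Bool) :
    ∀ (xs : List α) (acc : List α),
      (xs.foldl (fun a x => PySem.List.insertBy before x a) acc).head? =
        xs.foldl (fun (m : Option α) x =>
          some (match m with | none => x | some y => if before x y then x else y)) acc.head? := by
  intro xs
  induction xs with
  | nil => intro acc; rfl
  | cons x t ih =>
      intro acc
      simp only [List.foldl_cons]
      rw [ih, head_insertBy]

-- both ports as functions of the five looked-up scores, agreement outside the D_ condition
set_option maxHeartbeats 2000000 in
lemma core (g : String → Int)
    (h : ¬ (g "Gaming" ≤ -1 ∧ g "School/Work" ≤ -1 ∧ g "Job Search" ≤ -1 ∧ g "Browsing" ≤ -1 ∧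
            g "Unknown" ≤ -1 ∧ (g "Unknown" ≤ g "Gaming" ∨ g "Unknown" ≤ g "School/Work" ∨
            g "Unknown" ≤ g "Job Search" ∨ g "Unknown" ≤ g "Browsing"))) :
    (["Gaming", "School/Work", "Job Search", "Browsing", "Unknown"].foldl
        (fun (st : String × Int) c => if g c > st.2 then (c, g c) else st)
        ("Unknown", -1)).1
    = PySem.List.pyGetD
        (PySem.List.sorted ["Gaming", "School/Work", "Job Search", "Browsing", "Unknown"]
          (fun c => -(g c)) false)
        0 "" := by
  rw [PySem.List.sorted_eq_foldl_insertBy, PySem.List.pyGetD_zero,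
      show ∀ (xs : List String), xs.getD 0 "" = xs.head?.getD "" from fun xs => by cases xs <;> rfl,
      head_foldl_insertBy]
  simp only [List.foldl_cons, List.foldl_nil, List.head?, apply_ite Prod.snd, apply_ite Prod.fst,
    gt_iff_lt, decide_eq_true_eq, Option.getD_some, neg_lt_neg_iff]
  split_ifs <;> first | rfl | (exfalso; omega)

-- inside the D_ condition the two results differ everywhere
set_option maxHeartbeats 2000000 in
lemma core_ne (g : String → Int)
    (h : g "Gaming" ≤ -1 ∧ g "School/Work" ≤ -1 ∧ g "Job Search" ≤ -1 ∧ g "Browsing" ≤ -1 ∧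
         g "Unknown" ≤ -1 ∧ (g "Unknown" ≤ g "Gaming" ∨ g "Unknown" ≤ g "School/Work" ∨
         g "Unknown" ≤ g "Job Search" ∨ g "Unknown" ≤ g "Browsing")) :
    (["Gaming", "School/Work", "Job Search", "Browsing", "Unknown"].foldl
        (fun (st : String × Int) c => if g c > st.2 then (c, g c) else st)
        ("Unknown", -1)).1
    ≠ PySem.List.pyGetD
        (PySem.List.sorted ["Gaming", "School/Work", "Job Search", "Browsing", "Unknown"]
          (fun c => -(g c)) false)
        0 "" := by
  rw [PySem.List.sorted_eq_foldl_insertBy, PySem.List.pyGetD_zero,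
      show ∀ (xs : List String), xs.getD 0 "" = xs.head?.getD "" from fun xs => by cases xs <;> rfl,
      head_foldl_insertBy]
  simp only [List.foldl_cons, List.foldl_nil, List.head?, apply_ite Prod.snd, apply_ite Prod.fst,
    gt_iff_lt, decide_eq_true_eq, Option.getD_some, neg_lt_neg_iff]
  split_ifs <;> first | (exfalso; omega) | simp

-- ===== VERDICT (by name: the statement is the Claim_ definition above) =====
theorem get_primary_activity_spec : Claim_unchanged_get_primary_activity := by
  intro cs _ hD
  unfold D_get_primary_activity at hD
  exact core (fun c => (PySem.Dict.mk cs).getD c 0) hD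

theorem get_primary_activity_changed : Claim_changed_get_primary_activity := by
  unfold Claim_changed_get_primary_activity; decide

theorem get_primary_activity_tight : Claim_exact_get_primary_activity := by
  intro cs _ hD
  unfold D_get_primary_activity at hD
  exact core_ne (fun c => (PySem.Dict.mk cs).getD c 0) hD
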